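-- pv_equiv track=rewrite | github.com/green-fox-academy/FarkasLaszlo | week-02/day-03/Lists 06.py | contain
-- ===== SOURCE A (Python) =====
-- def contain(list_of_numbers):
--     a = 0
--     b = 0
--     c = 0
--     d = 0
--     for i in range(len(list_of_numbers)):
--         if a == 0 and list_of_numbers[i] == 4:
--             a = 1
--         elif b == 0 and list_of_numbers[i] == 8:
--             b = 1
--         elif c == 0 and list_of_numbers[i] == 12:
--             c = 1
--         elif d == 0 and list_of_numbers[i] == 16:
--             d = 1
--
--     if a + b + c + d == 4:
--         return True
--     else: return False
-- ===== SOURCE B (Python) =====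
-- def contain(list_of_numbers):
--     return all(n in list_of_numbers for n in (4, 8, 12, 16))
-- ===== Notes on version B (the rewrite author's own statement) =====
-- stated objective: idiomatic
-- what changed: Replaced the single index loop maintaining four elif-chained 0/1 flags with a direct all(...) of four independent membership tests over the targets 4, 8, 12, 16.
import Mathlib
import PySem

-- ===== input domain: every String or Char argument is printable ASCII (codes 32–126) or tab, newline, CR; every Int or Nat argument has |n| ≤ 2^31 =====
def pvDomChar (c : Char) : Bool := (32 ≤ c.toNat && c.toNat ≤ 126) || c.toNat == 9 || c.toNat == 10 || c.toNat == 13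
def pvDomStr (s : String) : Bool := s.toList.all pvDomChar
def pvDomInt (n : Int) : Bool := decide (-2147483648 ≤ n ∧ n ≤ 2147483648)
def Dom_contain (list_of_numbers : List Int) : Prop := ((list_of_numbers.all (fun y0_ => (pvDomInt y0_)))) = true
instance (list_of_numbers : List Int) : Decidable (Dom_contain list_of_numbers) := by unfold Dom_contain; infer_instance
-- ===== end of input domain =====

-- B replaces A's single flag-maintaining index loop with four independent membership tests (idiomatic `all`).

-- ===== PORT A =====
-- state = (a, b, c, d), the four 0/1 flags; one step of the elif chain on value v
def containStep (s : Int × Int × Int × Int) (v : Int) : Int × Int × Int × Int :=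
  if s.1 == 0 && v == 4 then (1, s.2.1, s.2.2.1, s.2.2.2)
  else if s.2.1 == 0 && v == 8 then (s.1, 1, s.2.2.1, s.2.2.2)
  else if s.2.2.1 == 0 && v == 12 then (s.1, s.2.1, 1, s.2.2.2)
  else if s.2.2.2 == 0 && v == 16 then (s.1, s.2.1, s.2.2.1, 1)
  else s

def contain (list_of_numbers : List Int) : Bool :=
  let st := (PySem.List.pyRange 0 (PySem.List.len list_of_numbers) 1).foldl
    (fun s i => containStep s (PySem.List.pyGetD list_of_numbers i 0)) ((0 : Int), (0 : Int), (0 : Int), (0 : Int))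
  if st.1 + st.2.1 + st.2.2.1 + st.2.2.2 == 4 then true else false

-- ===== PORT B =====
def contain_alt (list_of_numbers : List Int) : Bool :=
  [(4 : Int), 8, 12, 16].all (fun n => list_of_numbers.contains n)

-- ===== PRECONDITION & SPEC =====
def Spec_contain (list_of_numbers : List Int) (out : Bool) : Prop := out = contain_alt list_of_numbers
instance (list_of_numbers : List Int) (out : Bool) : Decidable (Spec_contain list_of_numbers out) := by unfold Spec_contain; infer_instance

-- ===== CLAIM (what is proved, stated in full; the proofs are below) =====
def Claim_equal_contain : Prop := ∀ (list_of_numbers : List Int), Dom_contain list_of_numbers → Spec_contain list_of_numbers (contain list_of_numbers)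

-- ===== LEMMAS AND PROOFS =====
def flagOr (s : Int) (m : Bool) : Int := if s = 1 ∨ m then 1 else 0

-- loop invariant: each flag ends as "was already 1, or its target occurs in the remaining list"
theorem containStep_foldl (xs : List Int) : ∀ (a b c d : Int),
    (a = 0 ∨ a = 1) → (b = 0 ∨ b = 1) → (c = 0 ∨ c = 1) → (d = 0 ∨ d = 1) →
    xs.foldl containStep (a, b, c, d) =
      (flagOr a (xs.contains 4), flagOr b (xs.contains 8),
       flagOr c (xs.contains 12), flagOr d (xs.contains 16)) := by
  induction xs with
  | nil =>
    intro a b c d ha hb hc hd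
    simp [flagOr]
    refine ⟨?_, ?_, ?_, ?_⟩ <;> split <;> omega
  | cons v xs ih =>
    intro a b c d ha hb hc hd
    simp only [List.foldl_cons]
    by_cases h4 : v = 4
    · subst h4
      have : containStep (a, b, c, d) 4 = (1, b, c, d) := by
        rcases ha with h | h <;> subst h <;> simp [containStep]
      rw [this, ih 1 b c d (Or.inr rfl) hb hc hd]
      simp [flagOr]
    · by_cases h8 : v = 8
      · subst h8
        have : containStep (a, b, c, d) 8 = (a, 1, c, d) := by
          rcases ha with h | h <;> rcases hb with h' | h' <;> subst h <;> subst h' <;>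
            simp [containStep]
        rw [this, ih a 1 c d ha (Or.inr rfl) hc hd]
        simp [flagOr]
      · by_cases h12 : v = 12
        · subst h12
          have : containStep (a, b, c, d) 12 = (a, b, 1, d) := by
            rcases ha with h | h <;> rcases hb with h' | h' <;> rcases hc with h'' | h'' <;>
              subst h <;> subst h' <;> subst h'' <;> simp [containStep]
          rw [this, ih a b 1 d ha hb (Or.inr rfl) hd]
          simp [flagOr]
        · by_cases h16 : v = 16
          · subst h16
            have : containStep (a, b, c, d) 16 = (a, b, c, 1) := by
              rcases ha with h | h <;> rcases hb with h' | h' <;> rcases hc with h'' | h'' <;>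
                rcases hd with h''' | h''' <;> subst h <;> subst h' <;> subst h'' <;>
                subst h''' <;> simp [containStep]
            rw [this, ih a b c 1 ha hb hc (Or.inr rfl)]
            simp [flagOr]
          · have : containStep (a, b, c, d) v = (a, b, c, d) := by
              simp [containStep, h4, h8, h12, h16]
            rw [this, ih a b c d ha hb hc hd]
            simp [flagOr, Ne.symm h4, Ne.symm h8, Ne.symm h12, Ne.symm h16]

-- ===== VERDICT (by name: the statement is the Claim_ definition above) =====
theorem contain_spec : Claim_equal_contain := by
  intro xs _
  show contain xs = contain_alt xs
  unfold contain
  rw [PySem.List.foldl_pyRange_zero_pyGetD xs 0 containStep ((0:Int),(0:Int),(0:Int),(0:Int))]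
  rw [containStep_foldl xs 0 0 0 0 (Or.inl rfl) (Or.inl rfl) (Or.inl rfl) (Or.inl rfl)]
  simp only [contain_alt, List.all_cons, List.all_nil, Bool.and_true, flagOr]
  cases h4 : xs.contains 4 <;> cases h8 : xs.contains 8 <;>
    cases h12 : xs.contains 12 <;> cases h16 : xs.contains 16 <;> simp
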